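-- pv_equiv track=rewrite | github.com/pypi-data/pypi-mirror-402 | packages/aisentry/aisentry-1.0.0.tar.gz/aisentry-1.0.0/src/aisentry/scorers/ethical_ai_scorer.py | _score_diverse_training_comprehensive
-- ===== SOURCE A (Python) =====
-- from typing import Any, Dict, List
--
-- def _score_diverse_training_comprehensive(parsed_data: Dict[str, Any]) -> int:
--     """
--     Score comprehensive diverse training data practices - Evidence-Based
--
--     Uses AST-based function detection for data diversity practices.
--     Diverse training data helps reduce bias in AI models.
--
--     Scoring tiers:
--     - 100: Diversity checks + balanced sampling + augmentation
--     - 75: Balanced sampling + augmentation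
--     - 60: Balanced sampling or diversity checks
--     - 0: None detected
--     """
--     # Data diversity is primarily about data preparation functions
--     function_defs = parsed_data.get('function_defs', [])
--     function_names = [f.lower() for f in function_defs]
--
--     # Diversity check functions
--     diversity_patterns = [
--         'check_diversity', 'diversity_analysis', 'measure_diversity',
--         'demographic_distribution', 'data_balance'
--     ]
--     has_diversity_checks = any(
--         any(pattern in func for pattern in diversity_patterns)
--         for func in function_names
--     )
--
--     # Balanced sampling functions
--     sampling_patterns = [
--         'balanced_sampling', 'stratified_sample', 'oversample', 'undersample',
--         'smote', 'balance_dataset', 'rebalance'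
--     ]
--     has_balanced_sampling = any(
--         any(pattern in func for pattern in sampling_patterns)
--         for func in function_names
--     )
--
--     # Data augmentation functions
--     augmentation_patterns = [
--         'augment', 'data_augmentation', 'synthetic_data', 'generate_samples',
--         'augment_dataset'
--     ]
--     has_augmentation = any(
--         any(pattern in func for pattern in augmentation_patterns)
--         for func in function_names
--     )
--
--     # Scoring logic
--     if has_diversity_checks and has_balanced_sampling and has_augmentation:
--         return 100
--     elif has_balanced_sampling and has_augmentation:
--         return 75
--     elif has_balanced_sampling or has_diversity_checks:
--         return 60
--     else:
--         return 0
-- ===== SOURCE B (Python) =====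
-- # Bitmask + score-table formulation: each pattern carries a group bit, one OR-fold
-- # builds a 3-bit mask over all names, and the final score is a table lookup.
-- _TAGGED_PATTERNS = (
--     [(p, 1) for p in ['check_diversity', 'diversity_analysis', 'measure_diversity',
--                       'demographic_distribution', 'data_balance']] +
--     [(p, 2) for p in ['balanced_sampling', 'stratified_sample', 'oversample', 'undersample',
--                       'smote', 'balance_dataset', 'rebalance']] +
--     [(p, 4) for p in ['augment', 'data_augmentation', 'synthetic_data', 'generate_samples',
--                       'augment_dataset']]
-- )
--
-- # score indexed by mask: bit 1 = diversity checks, bit 2 = balanced sampling, bit 4 = augmentation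
-- _SCORE_BY_MASK = [0, 60, 60, 60, 0, 60, 75, 100]
--
-- def _score_diverse_training_comprehensive(parsed_data):
--     mask = 0
--     for f in parsed_data.get('function_defs', []):
--         name = f.lower()
--         for pattern, bit in _TAGGED_PATTERNS:
--             if pattern in name:
--                 mask |= bit
--     return _SCORE_BY_MASK[mask]
-- ===== Notes on version B (the rewrite author's own statement) =====
-- stated objective: alternative
-- what changed: Replaces the three separate any-of-any boolean scans and the if/elif scoring chain with a single tagged pattern list (pattern, group-bit), one OR-fold building a 3-bit mask over all names, and a precomputed 8-entry score table indexed by the mask.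
import Mathlib
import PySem

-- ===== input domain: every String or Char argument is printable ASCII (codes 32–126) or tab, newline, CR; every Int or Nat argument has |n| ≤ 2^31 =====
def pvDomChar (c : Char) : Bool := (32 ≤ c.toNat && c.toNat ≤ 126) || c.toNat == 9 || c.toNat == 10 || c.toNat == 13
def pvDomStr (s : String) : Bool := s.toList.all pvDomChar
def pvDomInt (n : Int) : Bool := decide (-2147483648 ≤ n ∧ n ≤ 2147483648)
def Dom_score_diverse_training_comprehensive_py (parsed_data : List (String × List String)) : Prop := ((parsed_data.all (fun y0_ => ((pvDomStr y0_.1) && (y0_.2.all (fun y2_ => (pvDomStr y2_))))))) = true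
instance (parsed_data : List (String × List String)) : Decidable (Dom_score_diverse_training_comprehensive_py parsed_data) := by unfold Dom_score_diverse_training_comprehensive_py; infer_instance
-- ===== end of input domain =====

-- B replaces A's three boolean any-of-any scans and if/elif chain by one OR-fold over a
-- tagged pattern list building a 3-bit mask, scored by an 8-entry table (objective: alternative).


def diversityPatterns : List String :=
  ["check_diversity", "diversity_analysis", "measure_diversity",
   "demographic_distribution", "data_balance"]
def samplingPatterns : List String :=
  ["balanced_sampling", "stratified_sample", "oversample", "undersample",
   "smote", "balance_dataset", "rebalance"]
def augmentationPatterns : List String :=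
  ["augment", "data_augmentation", "synthetic_data", "generate_samples",
   "augment_dataset"]

-- ===== PORT A =====
def score_diverse_training_comprehensive_py (parsed_data : List (String × List String)) : Int :=
  let function_defs := PySem.Dict.getD (PySem.Dict.mk parsed_data) "function_defs" []
  let function_names := function_defs.map PySem.Str.lower
  let has_diversity_checks :=
    function_names.any (fun func => diversityPatterns.any (fun pattern => PySem.Str.isIn pattern func))
  let has_balanced_sampling :=
    function_names.any (fun func => samplingPatterns.any (fun pattern => PySem.Str.isIn pattern func))
  let has_augmentation :=
    function_names.any (fun func => augmentationPatterns.any (fun pattern => PySem.Str.isIn pattern func))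
  if has_diversity_checks && has_balanced_sampling && has_augmentation then 100
  else if has_balanced_sampling && has_augmentation then 75
  else if has_balanced_sampling || has_diversity_checks then 60
  else 0

-- ===== PORT B =====
-- Source B's merged pattern list, each pattern tagged with its group bit
def taggedPatterns : List (String × Nat) :=
  diversityPatterns.map (fun p => (p, 1)) ++
  samplingPatterns.map (fun p => (p, 2)) ++
  augmentationPatterns.map (fun p => (p, 4))

def scoreByMask : List Int := [0, 60, 60, 60, 0, 60, 75, 100]

def score_diverse_training_comprehensive_py_alt (parsed_data : List (String × List String)) : Int :=
  let mask :=
    (PySem.Dict.getD (PySem.Dict.mk parsed_data) "function_defs" []).foldl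
      (fun m f =>
        let name := PySem.Str.lower f
        taggedPatterns.foldl
          (fun m pb => if PySem.Str.isIn pb.1 name then m ||| pb.2 else m) m)
      0
  -- _SCORE_BY_MASK[mask]: mask is always 0..7, so Python's indexing is exact here
  scoreByMask.getD mask 0

-- ===== PRECONDITION & SPEC =====
def Spec_score_diverse_training_comprehensive_py (parsed_data : List (String × List String)) (out : Int) : Prop := out = score_diverse_training_comprehensive_py_alt parsed_data
instance (parsed_data : List (String × List String)) (out : Int) : Decidable (Spec_score_diverse_training_comprehensive_py parsed_data out) := by unfold Spec_score_diverse_training_comprehensive_py; infer_instance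

-- ===== CLAIM (what is proved, stated in full; the proofs are below) =====
def Claim_equal_score_diverse_training_comprehensive_py : Prop := ∀ (parsed_data : List (String × List String)), Dom_score_diverse_training_comprehensive_py parsed_data → Spec_score_diverse_training_comprehensive_py parsed_data (score_diverse_training_comprehensive_py parsed_data)

-- ===== LEMMAS AND PROOFS =====

-- the mask encoding of three group flags
def encodeMask (d s a : Bool) : Nat :=
  (if d then 1 else 0) ||| (if s then 2 else 0) ||| (if a then 4 else 0)

-- folding one tagged group (all bits equal to b) ORs in b iff some pattern matches
theorem foldl_group (ps : List String) (b : Nat) (name : String) (m : Nat) :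
    (ps.map (fun p => (p, b))).foldl
      (fun m pb => if PySem.Str.isIn pb.1 name then m ||| pb.2 else m) m
    = m ||| (if ps.any (fun p => PySem.Str.isIn p name) then b else 0) := by
  induction ps generalizing m with
  | nil => simp only [List.map_nil, List.foldl_nil, List.any_nil, Bool.false_eq_true,
      if_false, Nat.or_zero]
  | cons p rest ih =>
    simp only [List.map_cons, List.foldl_cons, List.any_cons]
    by_cases h : PySem.Str.isIn p name
    · rw [if_pos h, ih, if_pos (show (PySem.Str.isIn p name || rest.any fun p => PySem.Str.isIn p name) = true by rw [h, Bool.true_or])]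
      by_cases h2 : rest.any (fun p => PySem.Str.isIn p name)
      · rw [if_pos h2, Nat.or_assoc, Nat.or_self]
      · rw [if_neg h2, Nat.or_zero]
    · rw [if_neg h, ih]
      rw [Bool.not_eq_true] at h
      simp only [h, Bool.false_or]

-- folding the whole tagged list ORs in the encoded per-name mask
theorem foldl_tagged (name : String) (m : Nat) :
    taggedPatterns.foldl (fun m pb => if PySem.Str.isIn pb.1 name then m ||| pb.2 else m) m
    = m ||| encodeMask (diversityPatterns.any (fun p => PySem.Str.isIn p name))
                       (samplingPatterns.any (fun p => PySem.Str.isIn p name))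
                       (augmentationPatterns.any (fun p => PySem.Str.isIn p name)) := by
  unfold taggedPatterns encodeMask
  rw [List.foldl_append, List.foldl_append, foldl_group, foldl_group, foldl_group,
      Nat.or_assoc]
  ac_rfl

-- merging two encoded masks ORs the flags
theorem encodeMask_lor (d1 s1 a1 d2 s2 a2 : Bool) :
    encodeMask d1 s1 a1 ||| encodeMask d2 s2 a2
    = encodeMask (d1 || d2) (s1 || s2) (a1 || a2) := by
  cases d1 <;> cases s1 <;> cases a1 <;> cases d2 <;> cases s2 <;> cases a2 <;> decide

-- closed form of Source B's outer fold
theorem maskFold_eq (xs : List String) (m : Nat) :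
    xs.foldl (fun m f =>
        taggedPatterns.foldl
          (fun m pb => if PySem.Str.isIn pb.1 (PySem.Str.lower f) then m ||| pb.2 else m) m) m
    = m ||| encodeMask (xs.any (fun f => diversityPatterns.any (fun p => PySem.Str.isIn p (PySem.Str.lower f))))
                       (xs.any (fun f => samplingPatterns.any (fun p => PySem.Str.isIn p (PySem.Str.lower f))))
                       (xs.any (fun f => augmentationPatterns.any (fun p => PySem.Str.isIn p (PySem.Str.lower f)))) := by
  induction xs generalizing m with
  | nil => simp [encodeMask]
  | cons f rest ih =>
    simp only [List.foldl_cons, List.any_cons]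
    rw [foldl_tagged, ih, Nat.or_assoc, encodeMask_lor]

-- ===== VERDICT (by name: the statement is the Claim_ definition above) =====
theorem score_diverse_training_comprehensive_py_spec : Claim_equal_score_diverse_training_comprehensive_py := by
  intro parsed_data _
  show _ = _
  unfold score_diverse_training_comprehensive_py score_diverse_training_comprehensive_py_alt
  simp only [List.any_map, Function.comp_def, maskFold_eq, Nat.zero_or]
  generalize (PySem.Dict.getD (PySem.Dict.mk parsed_data) "function_defs" []).any
      (fun f => diversityPatterns.any (fun p => PySem.Str.isIn p (PySem.Str.lower f))) = d
  generalize (PySem.Dict.getD (PySem.Dict.mk parsed_data) "function_defs" []).any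
      (fun f => samplingPatterns.any (fun p => PySem.Str.isIn p (PySem.Str.lower f))) = s
  generalize (PySem.Dict.getD (PySem.Dict.mk parsed_data) "function_defs" []).any
      (fun f => augmentationPatterns.any (fun p => PySem.Str.isIn p (PySem.Str.lower f))) = a
  cases d <;> cases s <;> cases a <;> rfl
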